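-- pv_equiv track=rewrite | github.com/Rye123/fabulaautoma | lib/core/parsers.py | parse_defense_string
-- ===== SOURCE A (Python) =====
-- def parse_defense_string(defense: str) -> str:
--     """
--     Parses the defense string, returning the defense value.
--     Note that DEX, INS, MIG, WLP in this case refer to the SIZE of the dice.
--
--     Example:
--         ```
--         parse_defense_string("3+DEX + 1")   # returns "DEX+4"
--         ```
--     """
--
--     ACCEPTED_KEYWORDS = ["DEX", "INS", "MIG", "WLP"]
--
--     i = 0
--     keywords = []
--     bonus = 0
--     while i < len(defense):
--         match defense[i]:
--             case ' ' | '\t':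
--                 i += 1
--             case '+':  #TODO: I'm assuming there's no negatives here
--                 i += 1
--             case _:
--                 if defense[i].isdigit():
--                     # Parse until not a digit anymore
--                     j = i + 1
--                     while j < len(defense) and defense[j].isdigit():
--                         j += 1
--
--                     # Invariant: j is now end of string OR pointing to a non-digit
--                     number = int(defense[i:j])
--                     bonus += number
--                     i = j
--                 elif defense[i].isalpha():
--                     # Parse until we get a full keyword (only alphabetical chars)
--                     j = i + 1
--                     while j < len(defense) and defense[j].isalpha():
--                         j += 1
--
--                     # Invariant: j is now end of string OR pointing to a non-character
--                     keyword = defense[i:j]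
--                     found = False
--                     for test_keyword in ACCEPTED_KEYWORDS:
--                         if test_keyword == keyword:
--                             found = True
--
--                     if not found:
--                         raise ValueError(f"parse_defense_string: Invalid keyword {keyword}")
--                     keywords.append(keyword)
--                     i = j
--                 else:
--                     raise ValueError(f"parse_defense_string: Unexpected character {defense[i]}")
--
--     # Construct result string
--     res_defense = ""
--     keywords = sorted(keywords)
--     if len(keywords) != 0:
--         res_defense += "+".join(keywords)
--     if bonus != 0:
--         res_defense += f"+{bonus}"
--
--     return res_defense
-- ===== SOURCE B (Python) =====
-- def parse_defense_string(defense: str) -> str: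
--     """Single streaming pass: fold over characters maintaining (kind, run) of the
--     current maximal run, flushing a finished run into bonus/keywords."""
--     ACCEPTED_KEYWORDS = {"DEX", "INS", "MIG", "WLP"}
--
--     bonus = 0
--     keywords = []
--     kind, run = 'skip', ''
--
--     def flush(kind, run, bonus):
--         if kind == 'num':
--             bonus += int(run)
--         elif kind == 'kw':
--             if run not in ACCEPTED_KEYWORDS:
--                 raise ValueError(f"parse_defense_string: Invalid keyword {run}")
--             keywords.append(run)
--         return bonus
--
--     for c in defense:
--         if c in ' \t+':
--             k = 'skip'
--         elif c.isdigit():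
--             k = 'num'
--         elif c.isalpha():
--             k = 'kw'
--         else:
--             raise ValueError(f"parse_defense_string: Unexpected character {c}")
--         if k == kind:
--             run += c
--         else:
--             bonus = flush(kind, run, bonus)
--             kind, run = k, c
--     bonus = flush(kind, run, bonus)
--
--     res = "+".join(sorted(keywords))
--     if bonus != 0:
--         res += f"+{bonus}"
--     return res
-- ===== Notes on version B (the rewrite author's own statement) =====
-- stated objective: alternative
-- what changed: Replaced A's index-based while loop with nested lookahead scans and a linear keyword-search fold by a single character-at-a-time fold that maintains the current run's kind and flushes finished runs into the bonus/keyword accumulators (set membership for validation).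
import Mathlib
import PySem

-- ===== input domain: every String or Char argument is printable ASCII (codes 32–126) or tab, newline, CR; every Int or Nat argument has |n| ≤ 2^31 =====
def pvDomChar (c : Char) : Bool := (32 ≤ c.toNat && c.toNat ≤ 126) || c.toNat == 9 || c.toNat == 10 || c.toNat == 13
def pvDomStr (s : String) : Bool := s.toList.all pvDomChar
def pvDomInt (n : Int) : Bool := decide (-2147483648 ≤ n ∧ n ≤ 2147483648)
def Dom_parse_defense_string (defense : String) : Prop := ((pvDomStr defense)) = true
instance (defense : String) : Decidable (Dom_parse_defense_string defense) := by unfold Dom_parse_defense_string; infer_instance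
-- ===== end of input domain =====

-- B replaces A's index-based while loop (with inner lookahead scans and a linear keyword-search
-- fold) by a single character-at-a-time fold carrying the current run's kind, flushing finished
-- runs; objective: alternative decomposition, same cost.

-- char classes: on the printable-ASCII domain Dom (every claim below is restricted to it),
-- these are exactly Python's str.isdigit / str.isalpha; outside Dom nothing is claimed
def pvDigit (c : Char) : Bool := '0' ≤ c && c ≤ '9'
def pvAlpha (c : Char) : Bool := ('a' ≤ c && c ≤ 'z') || ('A' ≤ c && c ≤ 'Z')

def pvKeywordsA : List String := ["DEX", "INS", "MIG", "WLP"]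

-- ===== PORT A =====
-- A's inner `while j < len(defense) and defense[j].is…(): j += 1` plus the slice defense[i:j]:
-- returns (the scanned run after position i, the remaining suffix from j)
def pvSpan (p : Char → Bool) : List Char → List Char × List Char
  | [] => ([], [])
  | c :: rest =>
    if p c then
      let (t, r) := pvSpan p rest
      (c :: t, r)
    else ([], c :: rest)

theorem pvSpan_snd_length_le (p : Char → Bool) (cs : List Char) :
    (pvSpan p cs).2.length ≤ cs.length := by
  induction cs with
  | nil => simp [pvSpan]
  | cons c rest ih =>
    simp only [pvSpan]
    split
    · simpa using Nat.le_succ_of_le ih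
    · simp

-- A's while loop over index i, carried as the remaining suffix; none = ValueError
def pvLoopA : List Char → Int → List String → Option (Int × List String)
  | [], bonus, kws => some (bonus, kws)
  | c :: rest, bonus, kws =>
    if c = ' ' || c = '\t' then pvLoopA rest bonus kws
    else if c = '+' then pvLoopA rest bonus kws
    else if pvDigit c then
      match PySem.Int.ofChars? (c :: (pvSpan pvDigit rest).1) with
      | some n => pvLoopA (pvSpan pvDigit rest).2 (bonus + n) kws
      | none => none
    else if pvAlpha c then
      let kw := String.mk (c :: (pvSpan pvAlpha rest).1)
      if pvKeywordsA.foldl (fun f k => if k = kw then true else f) false then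
        pvLoopA (pvSpan pvAlpha rest).2 bonus (kws ++ [kw])
      else none
    else none
termination_by cs _ _ => cs.length
decreasing_by
  · simp
  · simp
  · exact Nat.lt_succ_of_le (pvSpan_snd_length_le _ _)
  · exact Nat.lt_succ_of_le (pvSpan_snd_length_le _ _)

def parse_defense_string (defense : String) : String :=
  match pvLoopA defense.toList 0 [] with
  | none => ""   -- A raises ValueError here; excluded by Pre_
  | some (bonus, kws) =>
    let kwsSorted := PySem.List.sorted kws (fun k => k) false
    let res := if kws.length ≠ 0 then PySem.Str.join "+" kwsSorted else ""
    if bonus ≠ 0 then res ++ "+" ++ PySem.Int.toStr bonus else res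

-- ===== PORT B =====
-- B's accepted-keyword set
def pvAcceptedB : PySem.Set String := PySem.Set.ofList ["DEX", "INS", "MIG", "WLP"]

-- B's run kinds: 0 = 'skip', 1 = 'num', 2 = 'kw'
def pvClassB (c : Char) : Option Nat :=
  if c = ' ' || c = '\t' || c = '+' then some 0
  else if pvDigit c then some 1
  else if pvAlpha c then some 2
  else none

-- B's flush: fold the finished run into (bonus, keywords); none = ValueError
def pvFlushB : Int × List String × Nat × List Char → Option (Int × List String)
  | (bonus, kws, kind, run) =>
    if kind = 1 then
      match PySem.Int.ofChars? run with
      | some n => some (bonus + n, kws)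
      | none => none
    else if kind = 2 then
      if String.mk run ∈ pvAcceptedB then some (bonus, kws ++ [String.mk run]) else none
    else some (bonus, kws)

def pvStepB (s : Int × List String × Nat × List Char) (c : Char) :
    Option (Int × List String × Nat × List Char) :=
  match pvClassB c with
  | none => none
  | some k =>
    match s with
    | (bonus, kws, kind, run) =>
      if k = kind then some (bonus, kws, kind, run ++ [c])
      else
        match pvFlushB (bonus, kws, kind, run) with
        | none => none
        | some (b', kws') => some (b', kws', k, [c])

-- B's `for c in defense` fold
def pvFoldB (cs : List Char) (s : Int × List String × Nat × List Char) :
    Option (Int × List String × Nat × List Char) :=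
  cs.foldl (fun os c => os.bind (pvStepB · c)) (some s)

-- fold then final flush
def pvRunB (cs : List Char) (s : Int × List String × Nat × List Char) :
    Option (Int × List String) :=
  (pvFoldB cs s).bind pvFlushB

def parse_defense_string_alt (defense : String) : String :=
  match pvRunB defense.toList (0, [], 0, []) with
  | none => ""   -- B raises ValueError here; excluded by Pre_
  | some (bonus, kws) =>
    let res := PySem.Str.join "+" (PySem.List.sorted kws (fun k => k) false)
    if bonus ≠ 0 then res ++ "+" ++ PySem.Int.toStr bonus else res

-- ===== PRECONDITION & SPEC =====
def pvOkChar (c : Char) : Bool := c = ' ' || c = '\t' || c = '+' || pvDigit c || pvAlpha c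

-- the maximal alphabetic runs of the string (cur = the letters of the current run, reversed)
def pvAlphaRunsGo : List Char → List Char → List (List Char)
  | [], cur => if cur = [] then [] else [cur.reverse]
  | c :: rest, cur =>
    if pvAlpha c then pvAlphaRunsGo rest (c :: cur)
    else if cur = [] then pvAlphaRunsGo rest []
    else cur.reverse :: pvAlphaRunsGo rest []

def pvAlphaRuns (cs : List Char) : List (List Char) := pvAlphaRunsGo cs []

-- Within the printable-ASCII domain Dom (which every claim assumes), Pre_ excludes exactly
-- the inputs on which A raises ValueError: a character that is not a blank, a plus sign, an
-- ASCII digit or an ASCII letter; or a maximal alphabetic run that is not an accepted keyword.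
def Pre_parse_defense_string (defense : String) : Prop :=
  defense.toList.all pvOkChar = true ∧
  ∀ r ∈ pvAlphaRuns defense.toList, String.mk r ∈ pvKeywordsA
instance (defense : String) : Decidable (Pre_parse_defense_string defense) := by
  unfold Pre_parse_defense_string; infer_instance

def pvWitness_parse_defense_string : String := "3+DEX + 1"

def Spec_parse_defense_string (defense : String) (out : String) : Prop :=
  out = parse_defense_string_alt defense
instance (defense : String) (out : String) : Decidable (Spec_parse_defense_string defense out) := by
  unfold Spec_parse_defense_string; infer_instance

-- ===== CLAIM (what is proved, stated in full; the proofs are below) =====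
def Claim_equal_parse_defense_string : Prop := ∀ (defense : String), Dom_parse_defense_string defense → Pre_parse_defense_string defense → Spec_parse_defense_string defense (parse_defense_string defense)

-- ===== LEMMAS AND PROOFS =====

theorem pvSpan_append (p : Char → Bool) (cs : List Char) :
    (pvSpan p cs).1 ++ (pvSpan p cs).2 = cs := by
  induction cs with
  | nil => simp [pvSpan]
  | cons c rest ih =>
    simp only [pvSpan]
    split
    · simpa using ih
    · simp

theorem pvSpan_fst_all (p : Char → Bool) (cs : List Char) :
    ∀ x ∈ (pvSpan p cs).1, p x = true := by
  induction cs with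
  | nil => simp [pvSpan]
  | cons c rest ih =>
    simp only [pvSpan]
    split
    · next h =>
      intro x hx
      simp only [List.mem_cons] at hx
      rcases hx with rfl | hx
      · exact h
      · exact ih x hx
    · simp

theorem pvSpan_snd_head (p : Char → Bool) (cs : List Char) :
    ∀ c, (pvSpan p cs).2.head? = some c → p c = false := by
  induction cs with
  | nil => simp [pvSpan]
  | cons c rest ih =>
    simp only [pvSpan]
    split
    · exact ih
    · next h => intro x hx; simp at hx; subst hx; simpa using h

theorem pvClassB_skip {c : Char} (h : (c = ' ' || c = '\t' || c = '+') = true) :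
    pvClassB c = some 0 := by
  simp only [pvClassB]
  rw [if_pos]; simpa using h

theorem pvDigit_ne_skip {c : Char} (h : pvDigit c = true) :
    (c = ' ' || c = '\t' || c = '+') = false := by
  simp only [pvDigit, Bool.and_eq_true, decide_eq_true_eq] at h
  simp only [Bool.or_eq_false_iff, decide_eq_false_iff_not]
  refine ⟨⟨?_, ?_⟩, ?_⟩ <;> rintro rfl <;> revert h <;> decide

theorem pvAlpha_ne_skip {c : Char} (h : pvAlpha c = true) :
    (c = ' ' || c = '\t' || c = '+') = false := by
  simp only [pvAlpha, Bool.or_eq_true, Bool.and_eq_true, decide_eq_true_eq] at h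
  simp only [Bool.or_eq_false_iff, decide_eq_false_iff_not]
  refine ⟨⟨?_, ?_⟩, ?_⟩ <;> rintro rfl <;> revert h <;> decide

theorem pvAlpha_not_digit {c : Char} (h : pvAlpha c = true) : pvDigit c = false := by
  simp only [pvAlpha, Bool.or_eq_true, Bool.and_eq_true, decide_eq_true_eq] at h
  rw [Bool.eq_false_iff]
  intro hd
  simp only [pvDigit, Bool.and_eq_true, decide_eq_true_eq] at hd
  simp only [Char.le_def, UInt32.le_iff_toNat_le] at h hd
  simp at h hd
  omega

theorem pvClassB_digit {c : Char} (h : pvDigit c = true) : pvClassB c = some 1 := by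
  simp only [pvClassB]
  rw [if_neg, if_pos h]
  simp [pvDigit_ne_skip h]

theorem pvClassB_alpha {c : Char} (h : pvAlpha c = true) : pvClassB c = some 2 := by
  simp only [pvClassB]
  rw [if_neg, if_neg, if_pos h]
  · simp [pvAlpha_not_digit h]
  · simp [pvAlpha_ne_skip h]

theorem pvClassB_none {c : Char} (h1 : (c = ' ' || c = '\t') = false) (h2 : (c = '+') = false)
    (h3 : pvDigit c = false) (h4 : pvAlpha c = false) : pvClassB c = none := by
  simp only [pvClassB]
  rw [if_neg, if_neg, if_neg]
  · simp [h4]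
  · simp [h3]
  · simp_all

theorem pvFoldB_none (cs : List Char) :
    cs.foldl (fun os c => os.bind (pvStepB · c)) none = none := by
  induction cs with
  | nil => rfl
  | cons c cs ih => simpa using ih

theorem pvFoldB_cons (c : Char) (cs : List Char) (s : Int × List String × Nat × List Char) :
    pvFoldB (c :: cs) s = (pvStepB s c).bind (pvFoldB cs ·) := by
  cases h : pvStepB s c with
  | none => simp [pvFoldB, List.foldl_cons, h, pvFoldB_none]
  | some s' => simp [pvFoldB, List.foldl_cons, h]

theorem pvRunB_cons (c : Char) (cs : List Char) (s : Int × List String × Nat × List Char) :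
    pvRunB (c :: cs) s = (pvStepB s c).bind (pvRunB cs ·) := by
  cases h : pvStepB s c with
  | none => simp [pvRunB, pvFoldB_cons, h]
  | some s' => simp [pvRunB, pvFoldB_cons, h]

-- inside a skip run the pending run text is irrelevant
theorem pvRunB_skip_run (cs : List Char) : ∀ (b : Int) (kws : List String) (r r' : List Char),
    pvRunB cs (b, kws, 0, r) = pvRunB cs (b, kws, 0, r') := by
  induction cs with
  | nil => intro b kws r r'; simp [pvRunB, pvFoldB, pvFlushB]
  | cons c cs ih =>
    intro b kws r r'
    rw [pvRunB_cons, pvRunB_cons]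
    cases h : pvClassB c with
    | none => simp [pvStepB, h]
    | some k =>
      by_cases hk : k = 0
      · subst hk
        simp only [pvStepB, h]
        rw [if_pos trivial, if_pos trivial, Option.bind_some, Option.bind_some]
        exact ih b kws (r ++ [c]) (r' ++ [c])
      · simp [pvStepB, h, hk, pvFlushB]

-- after a complete digit run, flushing now or at the next step is the same
theorem pvRunB_num_handoff (cs : List Char)
    (h : ∀ c, cs.head? = some c → pvDigit c = false) (b : Int) (kws : List String)
    (run : List Char) :
    pvRunB cs (b, kws, 1, run) =
      (PySem.Int.ofChars? run).bind (fun n => pvRunB cs (b + n, kws, 0, [])) := by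
  cases cs with
  | nil =>
    simp only [pvRunB, pvFoldB, List.foldl_nil, Option.bind_some]
    cases hn : PySem.Int.ofChars? run with
    | none => simp [pvFlushB, hn]
    | some n => simp [pvFlushB, hn]
  | cons c cs =>
    have hc := h c rfl
    cases hn : PySem.Int.ofChars? run with
    | none =>
      simp only [hn, Option.bind_none]
      rw [pvRunB_cons]
      cases hcl : pvClassB c with
      | none => simp [pvStepB, hcl]
      | some k =>
        have hk1 : k ≠ 1 := by
          rintro rfl
          simp only [pvClassB] at hcl
          split_ifs at hcl with h1 h2 h3 <;> simp_all
        simp [pvStepB, hcl, hk1, pvFlushB, hn]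
    | some n =>
      simp only [hn, Option.bind_some]
      rw [pvRunB_cons, pvRunB_cons]
      cases hcl : pvClassB c with
      | none => simp [pvStepB, hcl]
      | some k =>
        have hk1 : k ≠ 1 := by
          rintro rfl
          simp only [pvClassB] at hcl
          split_ifs at hcl with h1 h2 h3 <;> simp_all
        by_cases hk0 : k = 0
        · subst hk0
          simp [pvStepB, hcl, pvFlushB, hn]
        · simp [pvStepB, hcl, hk1, hk0, pvFlushB, hn]

-- after a complete alpha run, flushing now or at the next step is the same
theorem pvRunB_kw_handoff (cs : List Char)
    (h : ∀ c, cs.head? = some c → pvAlpha c = false) (b : Int) (kws : List String)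
    (run : List Char) :
    pvRunB cs (b, kws, 2, run) =
      if String.mk run ∈ pvAcceptedB then pvRunB cs (b, kws ++ [String.mk run], 0, []) else none := by
  cases cs with
  | nil =>
    simp only [pvRunB, pvFoldB, List.foldl_nil, Option.bind_some]
    by_cases hm : String.mk run ∈ pvAcceptedB <;> simp [pvFlushB, hm]
  | cons c cs =>
    have hc := h c rfl
    by_cases hm : String.mk run ∈ pvAcceptedB
    · rw [if_pos hm, pvRunB_cons, pvRunB_cons]
      cases hcl : pvClassB c with
      | none => simp [pvStepB, hcl]
      | some k =>
        have hk2 : k ≠ 2 := by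
          rintro rfl
          simp only [pvClassB] at hcl
          split_ifs at hcl with h1 h2 h3 <;> simp_all
        by_cases hk0 : k = 0
        · subst hk0
          simp [pvStepB, hcl, pvFlushB, hm]
        · simp [pvStepB, hcl, hk2, hk0, pvFlushB, hm]
    · rw [if_neg hm, pvRunB_cons]
      cases hcl : pvClassB c with
      | none => simp [pvStepB, hcl]
      | some k =>
        have hk2 : k ≠ 2 := by
          rintro rfl
          simp only [pvClassB] at hcl
          split_ifs at hcl with h1 h2 h3 <;> simp_all
        simp [pvStepB, hcl, hk2, pvFlushB, hm]

-- A's linear search over ACCEPTED_KEYWORDS equals B's set membership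
theorem pvFound_eq (kw : String) :
    pvKeywordsA.foldl (fun f k => if k = kw then true else f) false =
      decide (kw ∈ pvAcceptedB) := by
  have : kw ∈ pvAcceptedB ↔ kw ∈ pvKeywordsA := by
    simp [pvAcceptedB, PySem.Set.mem_ofList, pvKeywordsA]
  rw [show (decide (kw ∈ pvAcceptedB)) = decide (kw ∈ pvKeywordsA) by simp [this]]
  simp only [pvKeywordsA, List.foldl_cons, List.foldl_nil, List.mem_cons, List.not_mem_nil, or_false]
  split_ifs <;> simp_all [eq_comm]

-- B extends its pending run over every digit of the digit run
theorem pvRunB_digits (t : List Char) : ∀ (r : List Char) (b : Int) (kws : List String)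
    (run : List Char), (∀ x ∈ t, pvDigit x = true) →
    pvRunB (t ++ r) (b, kws, 1, run) = pvRunB r (b, kws, 1, run ++ t) := by
  induction t with
  | nil => intro r b kws run _; simp
  | cons x t ih =>
    intro r b kws run h
    have hx : pvDigit x = true := h x (by simp)
    rw [List.cons_append, pvRunB_cons]
    simp only [pvStepB, pvClassB_digit hx]
    rw [if_pos trivial, Option.bind_some, ih r b kws (run ++ [x]) (fun y hy => h y (by simp [hy]))]
    simp

-- B extends its pending run over every letter of the alpha run
theorem pvRunB_alphas (t : List Char) : ∀ (r : List Char) (b : Int) (kws : List String)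
    (run : List Char), (∀ x ∈ t, pvAlpha x = true) →
    pvRunB (t ++ r) (b, kws, 2, run) = pvRunB r (b, kws, 2, run ++ t) := by
  induction t with
  | nil => intro r b kws run _; simp
  | cons x t ih =>
    intro r b kws run h
    have hx : pvAlpha x = true := h x (by simp)
    rw [List.cons_append, pvRunB_cons]
    simp only [pvStepB, pvClassB_alpha hx]
    rw [if_pos trivial, Option.bind_some, ih r b kws (run ++ [x]) (fun y hy => h y (by simp [hy]))]
    simp

-- the main correspondence: A's token-at-a-time loop = B's char-at-a-time fold
theorem pvMain : ∀ (n : Nat) (cs : List Char), cs.length ≤ n → ∀ (b : Int) (kws : List String),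
    pvLoopA cs b kws = pvRunB cs (b, kws, 0, []) := by
  intro n
  induction n with
  | zero =>
    intro cs hcs b kws
    have : cs = [] := by cases cs <;> simp_all
    subst this
    simp [pvLoopA, pvRunB, pvFoldB, pvFlushB]
  | succ n ih =>
    intro cs hcs b kws
    cases cs with
    | nil => simp [pvLoopA, pvRunB, pvFoldB, pvFlushB]
    | cons c rest =>
      simp only [List.length_cons, Nat.succ_le_succ_iff] at hcs
      rw [pvRunB_cons]
      by_cases hsk : (c = ' ' || c = '\t') = true
      · have hcl : pvClassB c = some 0 := pvClassB_skip (by simp_all)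
        simp only [pvLoopA, if_pos hsk, pvStepB, hcl]
        rw [if_pos trivial, Option.bind_some, pvRunB_skip_run rest b kws ([] ++ [c]) [],
          ih rest hcs b kws]
      · by_cases hpl : c = '+'
        · have hcl : pvClassB c = some 0 := pvClassB_skip (by simp [hpl])
          simp only [pvLoopA, if_neg hsk, if_pos hpl, pvStepB, hcl]
          rw [if_pos trivial, Option.bind_some, pvRunB_skip_run rest b kws ([] ++ [c]) [],
            ih rest hcs b kws]
        · by_cases hd : pvDigit c = true
          · have hcl : pvClassB c = some 1 := pvClassB_digit hd
            simp only [pvLoopA, if_neg hsk, if_neg hpl, if_pos hd, pvStepB, hcl]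
            rw [if_neg (by decide : ¬(1 = 0))]
            simp only [pvFlushB]
            rw [if_neg (by decide : ¬(0 = 1)), if_neg (by decide : ¬(0 = 2))]
            simp only [Option.bind_some]
            have hall := pvSpan_fst_all pvDigit rest
            have hhead := pvSpan_snd_head pvDigit rest
            conv_rhs => rw [show rest = (pvSpan pvDigit rest).1 ++ (pvSpan pvDigit rest).2 from
              (pvSpan_append pvDigit rest).symm]
            rw [pvRunB_digits (pvSpan pvDigit rest).1 (pvSpan pvDigit rest).2 b kws [c] hall]
            rw [pvRunB_num_handoff _ (fun x hx => hhead x hx) b kws ([c] ++ (pvSpan pvDigit rest).1)]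
            have hr : (pvSpan pvDigit rest).2.length ≤ n :=
              le_trans (pvSpan_snd_length_le _ _) hcs
            cases hn : PySem.Int.ofChars? (c :: (pvSpan pvDigit rest).1) with
            | none => simp [hn]
            | some m =>
              simp only [List.singleton_append, hn, Option.bind_some]
              exact ih _ hr (b + m) kws
          · by_cases ha : pvAlpha c = true
            · have hcl : pvClassB c = some 2 := pvClassB_alpha ha
              simp only [pvLoopA, if_neg hsk, if_neg hpl, if_neg hd, if_pos ha, pvStepB, hcl]
              rw [if_neg (by decide : ¬(2 = 0))]
              simp only [pvFlushB]
              rw [if_neg (by decide : ¬(0 = 1)), if_neg (by decide : ¬(0 = 2))]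
              simp only [Option.bind_some]
              have hall := pvSpan_fst_all pvAlpha rest
              have hhead := pvSpan_snd_head pvAlpha rest
              conv_rhs => rw [show rest = (pvSpan pvAlpha rest).1 ++ (pvSpan pvAlpha rest).2 from
                (pvSpan_append pvAlpha rest).symm]
              rw [pvRunB_alphas (pvSpan pvAlpha rest).1 (pvSpan pvAlpha rest).2 b kws [c] hall]
              rw [pvRunB_kw_handoff _ (fun x hx => hhead x hx) b kws
                ([c] ++ (pvSpan pvAlpha rest).1)]
              have hr : (pvSpan pvAlpha rest).2.length ≤ n :=
                le_trans (pvSpan_snd_length_le _ _) hcs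
              rw [pvFound_eq]
              by_cases hm : String.mk (c :: (pvSpan pvAlpha rest).1) ∈ pvAcceptedB
              · simp only [List.singleton_append, hm, decide_true, if_true]
                exact ih _ hr b (kws ++ [String.mk (c :: (pvSpan pvAlpha rest).1)])
              · simp [hm]
            · have hcl : pvClassB c = none :=
                pvClassB_none (by simp_all) (by simp [hpl]) (by simp_all) (by simp_all)
              simp only [pvLoopA, if_neg hsk, if_neg hpl, if_neg hd, if_neg ha, pvStepB, hcl,
                Option.bind_none]

theorem pvJoin_nil : PySem.Str.join "+" [] = "" := by decide

-- ===== VERDICT (by name: the statement is the Claim_ definition above) =====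
theorem parse_defense_string_spec : Claim_equal_parse_defense_string := by
  intro defense _ _
  unfold Spec_parse_defense_string parse_defense_string parse_defense_string_alt
  rw [pvMain defense.toList.length defense.toList le_rfl 0 []]
  cases h : pvRunB defense.toList (0, [], 0, []) with
  | none => rfl
  | some p =>
    obtain ⟨b, kws⟩ := p
    cases kws with
    | nil =>
      simp only [List.length_nil, ne_eq, not_true_eq_false, if_false, ite_not]
      rw [show PySem.List.sorted ([] : List String) (fun k => k) false = [] from rfl, pvJoin_nil]
    | cons k ks => simp
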